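-- pv_equiv track=rewrite | github.com/Fawad-Javed-Fateh/Zephyr-I | MainFiles/project.py | FindDoubleMainVar
-- ===== SOURCE A (Python) =====
-- def FindDoubleMainVar(equation):
--     i=0
--     MainVar=[]
--     for x in equation:
--         if equation[i]>='t' and equation[i]<='z':
--             MainVar.append(equation[i])
--         i=i+1
--     MainVar=sorted(MainVar)
--     return MainVar
-- ===== SOURCE B (Python) =====
-- def FindDoubleMainVar(equation):
--     MainVar = []
--     for c in "tuvwxyz":
--         MainVar += [c] * equation.count(c)
--     return MainVar
-- ===== Notes on version B (the rewrite author's own statement) =====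
-- stated objective: faster
-- what changed: Replaces the index-tracking filter loop plus sorted() with a counting pass over the fixed 7-letter alphabet 't'..'z' (str.count per letter), emitting each letter's occurrences in alphabet order, so no sort is performed.
import Mathlib
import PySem

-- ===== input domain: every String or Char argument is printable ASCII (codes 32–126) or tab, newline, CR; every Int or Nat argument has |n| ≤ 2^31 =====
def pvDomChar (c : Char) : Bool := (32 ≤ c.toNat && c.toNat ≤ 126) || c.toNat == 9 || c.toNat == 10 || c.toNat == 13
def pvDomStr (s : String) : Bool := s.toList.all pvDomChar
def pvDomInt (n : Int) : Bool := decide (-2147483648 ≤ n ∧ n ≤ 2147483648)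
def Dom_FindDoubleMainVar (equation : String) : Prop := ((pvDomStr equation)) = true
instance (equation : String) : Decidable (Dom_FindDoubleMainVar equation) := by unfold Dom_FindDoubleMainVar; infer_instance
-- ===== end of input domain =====

-- B replaces A's filter-then-sort with a counting pass over the fixed alphabet 't'..'z' (no sort); return values proved equal on all inputs.

-- ===== PORT A =====
-- A: index-tracking loop appending equation[i] when 't' <= equation[i] <= 'z', then sorted().
def FindDoubleMainVar (equation : String) : List String :=
  PySem.List.sorted
    ((equation.toList.foldl
      (fun (st : Int × List String) (_x : Char) =>
        match PySem.List.pyGet? equation.toList st.1 with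
        | some c => (st.1 + 1, if 't' ≤ c ∧ c ≤ 'z' then st.2 ++ [String.ofList [c]] else st.2)
        | none => (st.1 + 1, st.2))   -- never taken: i stays in range of equation
      (0, [])).2)
    (fun s => s) false

-- ===== PORT B =====
-- B: for c in "tuvwxyz": MainVar += [c] * equation.count(c)
def FindDoubleMainVar_alt (equation : String) : List String :=
  "tuvwxyz".toList.foldl
    (fun acc c =>
      acc ++ PySem.List.pyRepeat [String.ofList [c]]
        ((PySem.Str.count equation (String.ofList [c]) : Int)))
    []

-- ===== PRECONDITION & SPEC =====
def Spec_FindDoubleMainVar (equation : String) (out : List String) : Prop := out = FindDoubleMainVar_alt equation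
instance (equation : String) (out : List String) : Decidable (Spec_FindDoubleMainVar equation out) := by unfold Spec_FindDoubleMainVar; infer_instance

-- ===== CLAIM (what is proved, stated in full; the proofs are below) =====
def Claim_equal_FindDoubleMainVar : Prop := ∀ (equation : String), Dom_FindDoubleMainVar equation → Spec_FindDoubleMainVar equation (FindDoubleMainVar equation)

-- ===== LEMMAS AND PROOFS =====

-- one-character strings compare like their characters
theorem pvSingle_le {a b : Char} (h : a ≤ b) : String.ofList [a] ≤ String.ofList [b] := by
  rw [String.le_iff_toList_le]
  simp only [String.toList_ofList]
  rcases lt_or_eq_of_le h with h' | h'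
  · exact le_of_lt (List.Lex.rel h')
  · subst h'; exact le_refl _

-- Python s.count(c) for a single character c is the character count
theorem pvCountGo_singleton (c : Char) (l : List Char) : ∀ (fuel acc : Nat), l.length ≤ fuel →
    PySem.Chars.count.go [c] fuel l acc = acc + l.count c := by
  induction l with
  | nil =>
    intro fuel acc _
    cases fuel <;> simp [PySem.Chars.count.go]
  | cons h t ih =>
    intro fuel acc hle
    cases fuel with
    | zero => simp at hle
    | succ f =>
      have hstep : PySem.Chars.count.go [c] (f + 1) (h :: t) acc =
          if [c].isPrefixOf (h :: t) then
            PySem.Chars.count.go [c] f (List.drop [c].length (h :: t)) (acc + 1)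
          else PySem.Chars.count.go [c] f t acc := rfl
      rw [hstep]
      have hlen : List.drop [c].length (h :: t) = t := rfl
      have hle' : t.length ≤ f := by simpa using hle
      by_cases hc : c = h
      · subst hc
        have hpre : ([c].isPrefixOf (c :: t)) = true := by simp [List.isPrefixOf]
        rw [if_pos hpre, hlen, ih f (acc + 1) hle']
        have : (c :: t).count c = t.count c + 1 := by simp
        rw [this]; omega
      · have hpre : ([c].isPrefixOf (h :: t)) = false := by
          simp [List.isPrefixOf]
          exact fun habs => hc habs
        rw [if_neg (by simp [hpre]), ih f acc hle']
        have : (h :: t).count c = t.count c := by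
          simp [Ne.symm hc]
        rw [this]

theorem pvCount_singleton (cs : List Char) (c : Char) :
    PySem.Chars.count cs [c] = cs.count c := by
  simp only [PySem.Chars.count, List.isEmpty_cons]
  simpa using pvCountGo_singleton c cs cs.length 0 le_rfl

-- characters between 't' and 'z' are exactly the seven alphabet letters
theorem pvAlpha_iff (a : Char) :
    ('t' ≤ a ∧ a ≤ 'z') ↔ a ∈ (['t','u','v','w','x','y','z'] : List Char) := by
  constructor
  · rintro ⟨h1, h2⟩
    have h1' : (116 : Nat) ≤ a.toNat := h1
    have h2' : a.toNat ≤ 122 := h2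
    have hofnat := Char.ofNat_toNat a
    interval_cases h : a.toNat <;>
      · rw [← hofnat]
        decide
  · intro hm
    fin_cases hm <;> exact ⟨by decide, by decide⟩

-- A's loop builds the filtered list of one-character strings
theorem pvLoopA (cs : List Char) : ∀ (l : List Char) (k : Nat) (acc : List String),
    cs.drop k = l →
    l.foldl
      (fun (st : Int × List String) (_x : Char) =>
        match PySem.List.pyGet? cs st.1 with
        | some c => (st.1 + 1, if 't' ≤ c ∧ c ≤ 'z' then st.2 ++ [String.ofList [c]] else st.2)
        | none => (st.1 + 1, st.2)) ((k : Int), acc)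
    = (((k : Int) + l.length),
       acc ++ (l.filter (fun c => decide ('t' ≤ c ∧ c ≤ 'z'))).map (fun c => String.ofList [c])) := by
  intro l
  induction l with
  | nil => intro k acc _; simp
  | cons h t ih =>
    intro k acc hdrop
    have hk : cs[k]? = some h := by
      have h0 : (List.drop k cs)[0]? = cs[k + 0]? := List.getElem?_drop
      rw [hdrop] at h0
      simpa using h0.symm
    have hdrop' : cs.drop (k + 1) = t := by
      have h2 : List.drop 1 (List.drop k cs) = List.drop (k + 1) cs := List.drop_drop
      rw [hdrop] at h2
      simpa using h2.symm
    simp only [List.foldl_cons]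
    rw [PySem.List.pyGet?_natCast, hk]
    dsimp only
    have hcast : ((k : Int) + 1) = ((k + 1 : Nat) : Int) := by push_cast; ring
    by_cases hc : ('t' ≤ h ∧ h ≤ 'z')
    · rw [if_pos hc, hcast, ih (k + 1) (acc ++ [String.ofList [h]]) hdrop']
      rw [Prod.ext_iff]
      constructor
      · simp only [List.length_cons]; push_cast; ring
      · simp [hc, List.append_assoc]
    · rw [if_neg hc, hcast, ih (k + 1) acc hdrop']
      rw [Prod.ext_iff]
      constructor
      · simp only [List.length_cons]; push_cast; ring
      · simp [hc]

-- A's port as sorted-of-filter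
theorem pvA_eq (equation : String) :
    FindDoubleMainVar equation =
      PySem.List.sorted
        ((equation.toList.filter (fun c => decide ('t' ≤ c ∧ c ≤ 'z'))).map (fun c => String.ofList [c]))
        (fun s => s) false := by
  unfold FindDoubleMainVar
  rw [show ((0 : Int), ([] : List String)) = (((0 : Nat) : Int), ([] : List String)) from rfl]
  rw [pvLoopA equation.toList equation.toList 0 [] (by simp)]
  simp

-- B's port as a flatMap of replicates over the alphabet
theorem pvB_eq (equation : String) :
    FindDoubleMainVar_alt equation =
      (['t','u','v','w','x','y','z'] : List Char).flatMap
        (fun c => List.replicate (equation.toList.count c) (String.ofList [c])) := by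
  unfold FindDoubleMainVar_alt
  rw [show "tuvwxyz".toList = (['t','u','v','w','x','y','z'] : List Char) by decide]
  rw [PySem.List.foldl_append_eq_flatMap]
  simp only [PySem.List.pyRepeat_singleton, PySem.Str.count_eq, String.toList_ofList,
    pvCount_singleton, Int.toNat_natCast, List.nil_append]

-- the character multiset of B's output equals A's filtered characters
theorem pvPermChars (cs : List Char) :
    ((['t','u','v','w','x','y','z'] : List Char).flatMap
        (fun c => List.replicate (cs.count c) c)).Perm
      (cs.filter (fun c => decide ('t' ≤ c ∧ c ≤ 'z'))) := by
  rw [List.perm_iff_count]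
  intro a
  by_cases hp : ('t' ≤ a ∧ a ≤ 'z')
  · have hmem := (pvAlpha_iff a).mp hp
    have hfil : (cs.filter (fun c => decide ('t' ≤ c ∧ c ≤ 'z'))).count a = cs.count a :=
      List.count_filter (by simpa using hp)
    rw [hfil]
    fin_cases hmem <;>
      simp [List.flatMap_cons, List.count_append, List.count_replicate]
  · have hfil : (cs.filter (fun c => decide ('t' ≤ c ∧ c ≤ 'z'))).count a = 0 := by
      rw [List.count_eq_zero]
      intro habs
      have := List.of_mem_filter habs
      simp at this
      exact hp this
    rw [hfil]
    have ht : a ≠ 't' := fun habs => hp (by subst habs; exact ⟨by decide, by decide⟩)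
    have hu : a ≠ 'u' := fun habs => hp (by subst habs; exact ⟨by decide, by decide⟩)
    have hv : a ≠ 'v' := fun habs => hp (by subst habs; exact ⟨by decide, by decide⟩)
    have hw : a ≠ 'w' := fun habs => hp (by subst habs; exact ⟨by decide, by decide⟩)
    have hx : a ≠ 'x' := fun habs => hp (by subst habs; exact ⟨by decide, by decide⟩)
    have hy : a ≠ 'y' := fun habs => hp (by subst habs; exact ⟨by decide, by decide⟩)
    have hz : a ≠ 'z' := fun habs => hp (by subst habs; exact ⟨by decide, by decide⟩)
    simp [List.flatMap_cons, List.count_append, List.count_replicate,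
      Ne.symm ht, Ne.symm hu, Ne.symm hv, Ne.symm hw,
      Ne.symm hx, Ne.symm hy, Ne.symm hz]

-- the flatMap over a strictly increasing alphabet is nondecreasing
theorem pvPairwiseFlat (f : Char → Nat) : ∀ (l : List Char), l.Pairwise (· < ·) →
    (l.flatMap (fun c => List.replicate (f c) (String.ofList [c]))).Pairwise (fun a b => a ≤ b) := by
  intro l
  induction l with
  | nil => intro _; simp
  | cons h t ih =>
    intro hp
    rw [List.flatMap_cons, List.pairwise_append]
    refine ⟨List.pairwise_replicate.mpr (Or.inr (le_refl _)), ih (List.Pairwise.of_cons hp), ?_⟩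
    intro x hx y hy
    have hx' := List.eq_of_mem_replicate hx
    rcases List.mem_flatMap.mp hy with ⟨d, hd, hyd⟩
    have hy' := List.eq_of_mem_replicate hyd
    subst hx'; subst hy'
    exact pvSingle_le (le_of_lt (List.rel_of_pairwise_cons hp hd))

-- ===== VERDICT (by name: the statement is the Claim_ definition above) =====
theorem FindDoubleMainVar_spec : Claim_equal_FindDoubleMainVar := by
  intro equation _
  unfold Spec_FindDoubleMainVar
  rw [pvA_eq, pvB_eq]
  apply PySem.List.sorted_id_eq_of_perm_of_pairwise
  · have hmap := (pvPermChars equation.toList).map (fun c => String.ofList [c])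
    simpa [List.map_flatMap, List.map_replicate] using hmap
  · exact pvPairwiseFlat _ _ (by decide)
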